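-- pv_equiv track=rewrite | github.com/lemonade113/exercise | 阶乘.py | facsum
-- ===== SOURCE A (Python) =====
-- def facsum(num):
--     sum=0
--     for i in range(1,num+1):
--         fac = 1
--         for j in range(1,i+1):
--             fac=j*fac
--         sum=sum+fac
--     return sum
-- ===== SOURCE B (Python) =====
-- def facsum(num):
--     total = 0
--     fac = 1
--     for i in range(1, num + 1):
--         fac = fac * i
--         total = total + fac
--     return total
-- ===== Notes on version B (the rewrite author's own statement) =====
-- stated objective: faster
-- what changed: B maintains the running factorial incrementally in a single pass instead of recomputing each i! with an inner loop.
import Mathlib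
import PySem

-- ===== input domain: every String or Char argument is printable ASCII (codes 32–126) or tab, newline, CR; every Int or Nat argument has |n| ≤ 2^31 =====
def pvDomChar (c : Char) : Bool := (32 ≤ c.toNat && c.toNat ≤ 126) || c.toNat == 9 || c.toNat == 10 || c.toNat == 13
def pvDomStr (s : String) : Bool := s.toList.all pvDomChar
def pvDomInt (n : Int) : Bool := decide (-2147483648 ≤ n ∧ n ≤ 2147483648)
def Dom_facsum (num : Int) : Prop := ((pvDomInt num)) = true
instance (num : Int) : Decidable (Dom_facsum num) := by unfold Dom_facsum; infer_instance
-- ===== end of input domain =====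

-- B replaces A's inner factorial loop by a running factorial maintained in one pass (O(n) vs O(n^2)).

-- ===== PORT A =====
-- A: outer loop over i summing, inner loop recomputing fac = i! from scratch
def facsum (num : Int) : Int :=
  (PySem.List.pyRange 1 (num + 1) 1).foldl
    (fun sum i =>
      sum + (PySem.List.pyRange 1 (i + 1) 1).foldl (fun fac j => j * fac) 1)
    0

-- ===== PORT B =====
-- B: single pass carrying (fac, total); fac multiplied by i each step
def facsum_alt (num : Int) : Int :=
  ((PySem.List.pyRange 1 (num + 1) 1).foldl
    (fun (p : Int × Int) i => (p.1 * i, p.2 + p.1 * i))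
    (1, 0)).2

-- ===== PRECONDITION & SPEC =====
def Spec_facsum (num : Int) (out : Int) : Prop := out = facsum_alt num
instance (num : Int) (out : Int) : Decidable (Spec_facsum num out) := by unfold Spec_facsum; infer_instance

-- ===== CLAIM (what is proved, stated in full; the proofs are below) =====
def Claim_equal_facsum : Prop := ∀ (num : Int), Dom_facsum num → Spec_facsum num (facsum num)

-- ===== LEMMAS AND PROOFS =====

-- joint invariant over the prefix 1..n: B's pair is (n!, A's sum)
theorem facsum_invariant (n : Nat) :
    (PySem.List.pyRange 1 ((n : Int) + 1) 1).foldl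
      (fun (p : Int × Int) i => (p.1 * i, p.2 + p.1 * i)) (1, 0)
    = ((PySem.List.pyRange 1 ((n : Int) + 1) 1).foldl (fun fac j => j * fac) 1,
       facsum (n : Int)) := by
  induction n with
  | zero => decide
  | succ m ih =>
      have h1 : (1 : Int) ≤ (m : Int) + 1 := by omega
      have hr : PySem.List.pyRange 1 ((↑(m + 1) : Int) + 1) 1
          = PySem.List.pyRange 1 ((m : Int) + 1) 1 ++ [(m : Int) + 1] := by
        push_cast
        exact PySem.List.pyRange_one_succ_right h1
      unfold facsum
      rw [hr, List.foldl_append, List.foldl_append, List.foldl_append]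
      unfold facsum at ih
      rw [ih]
      simp only [List.foldl]
      rw [Prod.mk.injEq]
      constructor
      · ring
      · rw [PySem.List.pyRange_one_succ_right h1, List.foldl_append]
        simp [List.foldl]
        ring

theorem facsum_eq_alt (num : Int) : facsum num = facsum_alt num := by
  by_cases h : num ≤ 0
  · have hnil : PySem.List.pyRange 1 (num + 1) 1 = [] :=
      PySem.List.pyRange_one_eq_nil (by omega)
    simp [facsum, facsum_alt, hnil]
  · have hn : num = ((num.toNat : Nat) : Int) := by omega
    rw [facsum_alt, hn, facsum_invariant]

-- ===== VERDICT (by name: the statement is the Claim_ definition above) =====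
theorem facsum_spec : Claim_equal_facsum := by
  intro num _
  show facsum num = facsum_alt num
  exact facsum_eq_alt num
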